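-- pv_equiv track=rewrite | github.com/NTKdz/UET_AICaroGame | backend/TicTacToeAi.py | evaluate_all_diagonals
-- ===== SOURCE A (Python) =====
-- def evaluate_all_diagonals(board, size, player, opponent):
--     score = 0
--     for d in range(-size + 1, size):
--         diagonal1 = get_diagonal(board, size, d, True)
--         diagonal2 = get_diagonal(board, size, d, False)
--         score += evaluate_line(diagonal1, player, opponent)
--         score += evaluate_line(diagonal2, player, opponent)
--     return score
--
-- def get_diagonal(board, size, offset, top_left_to_bottom_right):
--     diagonal = []
--     for i in range(max(0, offset), min(size, size + offset)):
--         if top_left_to_bottom_right: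
--             j = i - offset
--             if 0 <= j < size:
--                 diagonal.append(board[i][j])
--         else:
--             j = size - 1 - (i - offset)
--             if 0 <= j < size:
--                 diagonal.append(board[i][j])
--     return diagonal
--
-- def evaluate_line(line, player, opponent):
--     score = 0
--     patterns = {
--         player*5: 10000,
--         player*4 + ' ': 1000,
--         ' ' + player*4: 1000,
--         ' ' + player*3 + ' ': 100,
--         player + ' ' + player*2: 70,
--         player*2 + ' ' + player: 70,
--         player*3 + '  ': 50,
--         '  ' + player*3: 50,
--         player*2 + '   ': 10,
--         ' ' + player*2 + '  ': 10,
--         '  ' + player*2 + ' ': 10,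
--         '   ' + player*2: 10,
--         player + '    ': 1,
--         ' ' + player + '   ': 1,
--         '  ' + player + '  ': 1,
--         '   ' + player + ' ': 1,
--         opponent*5: -10000,
--         opponent*4 + ' ': -2000,
--         ' ' + opponent*4: -2000,
--         opponent*2 + ' ' + opponent: -1000,
--         opponent + ' ' + opponent*2: -1000,
--         ' ' + opponent*3 + ' ': -500,
--         opponent*3 + '  ': -500,
--         '  ' + opponent*3: -500,
--         opponent*2 + '   ': -10,
--         ' ' + opponent*2 + '  ': -10,
--         '  ' + opponent*2: -10,
--         opponent + '    ': -1,
--         ' ' + opponent + '   ': -1,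
--         '  ' + opponent + '  ': -1,
--         '   ' + opponent + ' ': -1
--     }
--
--     line_str = ''.join(line)
--     for pattern, value in patterns.items():
--         score += line_str.count(pattern) * value
--     return score
-- ===== SOURCE B (Python) =====
-- # B: one pass buckets cells by i-j / i+j into two dicts, and the 31 heuristic
-- # patterns are generated by expanding '*'/' ' templates instead of a hand-written
-- # dict literal; per-pattern counting still uses str.count (non-overlapping).
-- _PLAYER_TEMPLATES = [
--     ("*****", 10000), ("**** ", 1000), (" ****", 1000), (" *** ", 100),
--     ("* **", 70), ("** *", 70), ("***  ", 50), ("  ***", 50),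
--     ("**   ", 10), (" **  ", 10), ("  ** ", 10), ("   **", 10),
--     ("*    ", 1), (" *   ", 1), ("  *  ", 1), ("   * ", 1),
-- ]
-- _OPP_TEMPLATES = [
--     ("*****", -10000), ("**** ", -2000), (" ****", -2000),
--     ("** *", -1000), ("* **", -1000),
--     (" *** ", -500), ("***  ", -500), ("  ***", -500),
--     ("**   ", -10), (" **  ", -10), ("  **", -10),
--     ("*    ", -1), (" *   ", -1), ("  *  ", -1), ("   * ", -1),
-- ]
--
-- def _expand(template, mark):
--     return ''.join(mark if c == '*' else ' ' for c in template)
--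
-- def _score_line(line_str, player, opponent):
--     table = {}
--     for t, v in _PLAYER_TEMPLATES:
--         table[_expand(t, player)] = v
--     for t, v in _OPP_TEMPLATES:
--         table[_expand(t, opponent)] = v
--     return sum(line_str.count(p) * v for p, v in table.items())
--
-- def evaluate_all_diagonals(board, size, player, opponent):
--     main = {}
--     anti = {}
--     for i in range(size):
--         for j in range(size):
--             cell = board[i][j]
--             main.setdefault(i - j, []).append(cell)
--             anti.setdefault(i + j, []).append(cell)
--     total = 0
--     for line in main.values():
--         total += _score_line(''.join(line), player, opponent)
--     for line in anti.values():
--         total += _score_line(''.join(line), player, opponent)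
--     return total
-- ===== Notes on version B (the rewrite author's own statement) =====
-- stated objective: alternative
-- what changed: Instead of extracting each of the 2*(2*size-1) diagonals with a separate index-range scan (get_diagonal per offset and direction), B makes one pass over the board bucketing every cell into two dicts keyed by i-j (main diagonals) and i+j (anti-diagonals), and replaces the hand-written 31-entry pattern dict literal by a table generated from '*'/' ' templates expanded with the player/opponent string; per-pattern counting still uses str.count.
import Mathlib
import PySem

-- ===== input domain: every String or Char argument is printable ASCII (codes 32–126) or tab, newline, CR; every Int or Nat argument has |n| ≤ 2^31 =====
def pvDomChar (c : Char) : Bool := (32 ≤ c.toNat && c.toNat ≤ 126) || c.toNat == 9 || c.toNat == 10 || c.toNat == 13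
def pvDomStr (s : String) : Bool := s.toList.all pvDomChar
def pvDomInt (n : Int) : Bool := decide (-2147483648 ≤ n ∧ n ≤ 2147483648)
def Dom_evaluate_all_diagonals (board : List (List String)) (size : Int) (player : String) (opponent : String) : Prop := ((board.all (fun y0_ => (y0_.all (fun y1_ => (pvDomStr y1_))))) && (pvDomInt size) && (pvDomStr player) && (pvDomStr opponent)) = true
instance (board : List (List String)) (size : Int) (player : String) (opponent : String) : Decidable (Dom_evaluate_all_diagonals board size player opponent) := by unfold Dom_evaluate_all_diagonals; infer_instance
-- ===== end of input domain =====

-- B re-decomposes A: one pass buckets cells into two dicts keyed by i-j and i+j, and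
-- the 31-pattern table is generated by expanding '*'/' ' templates instead of the
-- hand-written dict literal (objective: alternative decomposition, same result).

-- ===== PORT A =====
-- board[i][j]  (in range under Pre_; exact there — both Pythons index the same cells)
def pvCell (board : List (List String)) (i j : Int) : String :=
  (PySem.List.pyGet? ((PySem.List.pyGet? board i).getD []) j).getD ""

-- Python  s * n  (str repetition) and  s + t  (str concatenation), exact via code-point lists
def pvSMul (s : String) (n : Int) : String := String.ofList (PySem.List.pyRepeat s.toList n)
def pvCat (s t : String) : String := String.ofList (s.toList ++ t.toList)

-- literal transliteration of A's evaluate_line (its 31-entry dict literal, then the count loop)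
def evaluate_line (line : List String) (player opponent : String) : Int :=
  let patterns : PySem.Dict String Int := PySem.Dict.empty
    |>.insert (pvSMul player 5) 10000
    |>.insert (pvCat (pvSMul player 4) " ") 1000
    |>.insert (pvCat " " (pvSMul player 4)) 1000
    |>.insert (pvCat (pvCat " " (pvSMul player 3)) " ") 100
    |>.insert (pvCat (pvCat player " ") (pvSMul player 2)) 70
    |>.insert (pvCat (pvCat (pvSMul player 2) " ") player) 70
    |>.insert (pvCat (pvSMul player 3) "  ") 50
    |>.insert (pvCat "  " (pvSMul player 3)) 50
    |>.insert (pvCat (pvSMul player 2) "   ") 10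
    |>.insert (pvCat (pvCat " " (pvSMul player 2)) "  ") 10
    |>.insert (pvCat (pvCat "  " (pvSMul player 2)) " ") 10
    |>.insert (pvCat "   " (pvSMul player 2)) 10
    |>.insert (pvCat player "    ") 1
    |>.insert (pvCat (pvCat " " player) "   ") 1
    |>.insert (pvCat (pvCat "  " player) "  ") 1
    |>.insert (pvCat (pvCat "   " player) " ") 1
    |>.insert (pvSMul opponent 5) (-10000)
    |>.insert (pvCat (pvSMul opponent 4) " ") (-2000)
    |>.insert (pvCat " " (pvSMul opponent 4)) (-2000)
    |>.insert (pvCat (pvCat (pvSMul opponent 2) " ") opponent) (-1000)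
    |>.insert (pvCat (pvCat opponent " ") (pvSMul opponent 2)) (-1000)
    |>.insert (pvCat (pvCat " " (pvSMul opponent 3)) " ") (-500)
    |>.insert (pvCat (pvSMul opponent 3) "  ") (-500)
    |>.insert (pvCat "  " (pvSMul opponent 3)) (-500)
    |>.insert (pvCat (pvSMul opponent 2) "   ") (-10)
    |>.insert (pvCat (pvCat " " (pvSMul opponent 2)) "  ") (-10)
    |>.insert (pvCat "  " (pvSMul opponent 2)) (-10)
    |>.insert (pvCat opponent "    ") (-1)
    |>.insert (pvCat (pvCat " " opponent) "   ") (-1)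
    |>.insert (pvCat (pvCat "  " opponent) "  ") (-1)
    |>.insert (pvCat (pvCat "   " opponent) " ") (-1)
  let line_str := PySem.Str.join "" line
  patterns.items.foldl (fun score p => score + (PySem.Str.count line_str p.1 : Int) * p.2) 0

def get_diagonal (board : List (List String)) (size offset : Int) (top_left_to_bottom_right : Bool) : List String :=
  (PySem.List.pyRange (max 0 offset) (min size (size + offset)) 1).foldl
    (fun diagonal i =>
      if top_left_to_bottom_right then
        let j := i - offset
        if 0 ≤ j ∧ j < size then diagonal ++ [pvCell board i j] else diagonal
      else
        let j := size - 1 - (i - offset)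
        if 0 ≤ j ∧ j < size then diagonal ++ [pvCell board i j] else diagonal)
    []

def evaluate_all_diagonals (board : List (List String)) (size : Int) (player : String) (opponent : String) : Int :=
  (PySem.List.pyRange (-size + 1) size 1).foldl
    (fun score d =>
      score + evaluate_line (get_diagonal board size d true) player opponent
            + evaluate_line (get_diagonal board size d false) player opponent)
    0

-- ===== PORT B =====
def pvPlayerTemplates : List (String × Int) :=
  [("*****", 10000), ("**** ", 1000), (" ****", 1000), (" *** ", 100),
   ("* **", 70), ("** *", 70), ("***  ", 50), ("  ***", 50),
   ("**   ", 10), (" **  ", 10), ("  ** ", 10), ("   **", 10),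
   ("*    ", 1), (" *   ", 1), ("  *  ", 1), ("   * ", 1)]

def pvOppTemplates : List (String × Int) :=
  [("*****", -10000), ("**** ", -2000), (" ****", -2000),
   ("** *", -1000), ("* **", -1000),
   (" *** ", -500), ("***  ", -500), ("  ***", -500),
   ("**   ", -10), (" **  ", -10), ("  **", -10),
   ("*    ", -1), (" *   ", -1), ("  *  ", -1), ("   * ", -1)]

-- ''.join(mark if c == '*' else ' ' for c in template)
def pvExpand (template mark : String) : String :=
  String.ofList (template.toList.flatMap (fun c => if c == '*' then mark.toList else [' ']))

-- B's _score_line: fill the table from the two template lists, then sum count*value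
def score_line (line_str player opponent : String) : Int :=
  let table :=
    pvOppTemplates.foldl (fun d tv => d.insert (pvExpand tv.1 opponent) tv.2)
      (pvPlayerTemplates.foldl (fun d tv => d.insert (pvExpand tv.1 player) tv.2)
        PySem.Dict.empty)
  (table.items.map (fun pv => (PySem.Str.count line_str pv.1 : Int) * pv.2)).sum

def evaluate_all_diagonals_alt (board : List (List String)) (size : Int) (player : String) (opponent : String) : Int :=
  let dicts :=
    (PySem.List.pyRange 0 size 1).foldl
      (fun (st : PySem.Dict Int (List String) × PySem.Dict Int (List String)) i =>
        (PySem.List.pyRange 0 size 1).foldl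
          (fun st j =>
            (st.1.modify (i - j) [] (· ++ [pvCell board i j]),    -- main.setdefault(i-j, []).append(cell)
             st.2.modify (i + j) [] (· ++ [pvCell board i j])))   -- anti.setdefault(i+j, []).append(cell)
          st)
      (PySem.Dict.empty, PySem.Dict.empty)
  let total :=
    dicts.1.values.foldl (fun total line => total + score_line (PySem.Str.join "" line) player opponent) 0
  dicts.2.values.foldl (fun total line => total + score_line (PySem.Str.join "" line) player opponent) total

-- ===== PRECONDITION & SPEC =====
-- Pre_ excludes exactly the inputs where Python A raises IndexError: for 0 < size the
-- board must have at least `size` rows each of length at least `size` (A reads every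
-- cell board[i][j], 0 ≤ i, j < size; for size ≤ 0 A touches nothing and returns 0).
def Pre_evaluate_all_diagonals (board : List (List String)) (size : Int) (player : String) (opponent : String) : Prop :=
  0 < size → (size ≤ (board.length : Int) ∧ ∀ row ∈ board.take size.toNat, size ≤ (row.length : Int))
instance (board : List (List String)) (size : Int) (player : String) (opponent : String) : Decidable (Pre_evaluate_all_diagonals board size player opponent) := by unfold Pre_evaluate_all_diagonals; infer_instance

def pvWitness_evaluate_all_diagonals : List (List String) × Int × String × String :=
  ([["x", "o"], ["o", "x"]], 2, "x", "o")

def Spec_evaluate_all_diagonals (board : List (List String)) (size : Int) (player : String) (opponent : String) (out : Int) : Prop := out = evaluate_all_diagonals_alt board size player opponent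
instance (board : List (List String)) (size : Int) (player : String) (opponent : String) (out : Int) : Decidable (Spec_evaluate_all_diagonals board size player opponent out) := by unfold Spec_evaluate_all_diagonals; infer_instance

-- ===== CLAIM (what is proved, stated in full; the proofs are below) =====
def Claim_equal_evaluate_all_diagonals : Prop := ∀ (board : List (List String)) (size : Int) (player : String) (opponent : String), Dom_evaluate_all_diagonals board size player opponent → Pre_evaluate_all_diagonals board size player opponent → Spec_evaluate_all_diagonals board size player opponent (evaluate_all_diagonals board size player opponent)

-- ===== LEMMAS AND PROOFS =====

lemma pvE0 (s : String) : pvExpand "*****" s = pvSMul s 5 := by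
  simp only [pvExpand, pvSMul]
  refine congrArg String.ofList ?_
  simp [PySem.List.pyRepeat, List.flatMap]


lemma pvE1 (s : String) : pvExpand "**** " s = pvCat (pvSMul s 4) " " := by
  simp only [pvExpand, pvCat, pvSMul]
  refine congrArg String.ofList ?_
  simp [PySem.List.pyRepeat, List.flatMap]


lemma pvE2 (s : String) : pvExpand " ****" s = pvCat " " (pvSMul s 4) := by
  simp only [pvExpand, pvCat, pvSMul]
  refine congrArg String.ofList ?_
  simp [PySem.List.pyRepeat, List.flatMap]


lemma pvE3 (s : String) : pvExpand " *** " s = pvCat (pvCat " " (pvSMul s 3)) " " := by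
  simp only [pvExpand, pvCat, pvSMul]
  refine congrArg String.ofList ?_
  simp [PySem.List.pyRepeat, List.flatMap]


lemma pvE4 (s : String) : pvExpand "* **" s = pvCat (pvCat s " ") (pvSMul s 2) := by
  simp only [pvExpand, pvCat, pvSMul]
  refine congrArg String.ofList ?_
  simp [PySem.List.pyRepeat, List.flatMap]


lemma pvE5 (s : String) : pvExpand "** *" s = pvCat (pvCat (pvSMul s 2) " ") s := by
  simp only [pvExpand, pvCat, pvSMul]
  refine congrArg String.ofList ?_
  simp [PySem.List.pyRepeat, List.flatMap]


lemma pvE6 (s : String) : pvExpand "***  " s = pvCat (pvSMul s 3) "  " := by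
  simp only [pvExpand, pvCat, pvSMul]
  refine congrArg String.ofList ?_
  simp [PySem.List.pyRepeat, List.flatMap]


lemma pvE7 (s : String) : pvExpand "  ***" s = pvCat "  " (pvSMul s 3) := by
  simp only [pvExpand, pvCat, pvSMul]
  refine congrArg String.ofList ?_
  simp [PySem.List.pyRepeat, List.flatMap]


lemma pvE8 (s : String) : pvExpand "**   " s = pvCat (pvSMul s 2) "   " := by
  simp only [pvExpand, pvCat, pvSMul]
  refine congrArg String.ofList ?_
  simp [PySem.List.pyRepeat, List.flatMap]


lemma pvE9 (s : String) : pvExpand " **  " s = pvCat (pvCat " " (pvSMul s 2)) "  " := by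
  simp only [pvExpand, pvCat, pvSMul]
  refine congrArg String.ofList ?_
  simp [PySem.List.pyRepeat, List.flatMap]


lemma pvE10 (s : String) : pvExpand "  ** " s = pvCat (pvCat "  " (pvSMul s 2)) " " := by
  simp only [pvExpand, pvCat, pvSMul]
  refine congrArg String.ofList ?_
  simp [PySem.List.pyRepeat, List.flatMap]


lemma pvE11 (s : String) : pvExpand "   **" s = pvCat "   " (pvSMul s 2) := by
  simp only [pvExpand, pvCat, pvSMul]
  refine congrArg String.ofList ?_
  simp [PySem.List.pyRepeat, List.flatMap]


lemma pvE12 (s : String) : pvExpand "*    " s = pvCat s "    " := by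
  simp only [pvExpand, pvCat]
  refine congrArg String.ofList ?_
  simp [List.flatMap]


lemma pvE13 (s : String) : pvExpand " *   " s = pvCat (pvCat " " s) "   " := by
  simp only [pvExpand, pvCat]
  refine congrArg String.ofList ?_
  simp [List.flatMap]


lemma pvE14 (s : String) : pvExpand "  *  " s = pvCat (pvCat "  " s) "  " := by
  simp only [pvExpand, pvCat]
  refine congrArg String.ofList ?_
  simp [List.flatMap]


lemma pvE15 (s : String) : pvExpand "   * " s = pvCat (pvCat "   " s) " " := by
  simp only [pvExpand, pvCat]
  refine congrArg String.ofList ?_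
  simp [List.flatMap]


lemma pvE16 (s : String) : pvExpand "  **" s = pvCat "  " (pvSMul s 2) := by
  simp only [pvExpand, pvCat, pvSMul]
  refine congrArg String.ofList ?_
  simp [PySem.List.pyRepeat, List.flatMap]


-- B's template-built table is A's pattern dict, so the two line scorers agree
lemma pv_line_eq (line : List String) (player opponent : String) :
    evaluate_line line player opponent
      = score_line (PySem.Str.join "" line) player opponent := by
  unfold evaluate_line score_line
  rw [PySem.List.foldl_add
    (g := fun p : String × Int => (PySem.Str.count (PySem.Str.join "" line) p.1 : Int) * p.2)]
  simp only [pvPlayerTemplates, pvOppTemplates, List.foldl,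
    pvE0, pvE1, pvE2, pvE3, pvE4, pvE5, pvE6, pvE7, pvE8, pvE9, pvE10, pvE11, pvE12,
    pvE13, pvE14, pvE15, pvE16]
  rw [zero_add]

-- proof-only abbreviations: the flattened cell stream and the two grouping folds of B
def pvPairs (size : Int) : List (Int × Int) :=
  (PySem.List.pyRange 0 size 1).flatMap (fun i => (PySem.List.pyRange 0 size 1).map (fun j => (i, j)))
def pvPM (board : List (List String)) (size : Int) : List (Int × String) :=
  (pvPairs size).map (fun p => (p.1 - p.2, pvCell board p.1 p.2))
def pvPA (board : List (List String)) (size : Int) : List (Int × String) :=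
  (pvPairs size).map (fun p => (p.1 + p.2, pvCell board p.1 p.2))
def pvGroup (l : List (Int × String)) : PySem.Dict Int (List String) :=
  l.foldl (fun d q => d.modify q.1 [] (· ++ [q.2])) PySem.Dict.empty

lemma pv_foldl_nested {α β γ : Type} (L1 : List α) (L2 : List β) (F : γ → α → β → γ) (init : γ) :
    L1.foldl (fun st i => L2.foldl (fun st j => F st i j) st) init
      = (L1.flatMap (fun i => L2.map (fun j => (i, j)))).foldl (fun st p => F st p.1 p.2) init := by
  induction L1 generalizing init with
  | nil => rfl
  | cons a t ih => simp [List.foldl_append, List.foldl_map, ih]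

lemma pv_group_eq (board : List (List String)) (size : Int) :
    (pvPairs size).foldl (fun d p => d.modify (p.1 - p.2) [] (· ++ [pvCell board p.1 p.2])) PySem.Dict.empty
      = pvGroup (pvPM board size) ∧
    (pvPairs size).foldl (fun d p => d.modify (p.1 + p.2) [] (· ++ [pvCell board p.1 p.2])) PySem.Dict.empty
      = pvGroup (pvPA board size) := by
  unfold pvGroup pvPM pvPA
  rw [List.foldl_map, List.foldl_map]
  exact ⟨rfl, rfl⟩

lemma pv_alt_eq (board : List (List String)) (size : Int) (player opponent : String) :
    evaluate_all_diagonals_alt board size player opponent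
      = ((pvGroup (pvPM board size)).values.map (fun l => score_line (PySem.Str.join "" l) player opponent)).sum
      + ((pvGroup (pvPA board size)).values.map (fun l => score_line (PySem.Str.join "" l) player opponent)).sum := by
  simp only [evaluate_all_diagonals_alt]
  rw [pv_foldl_nested (F := fun (st : PySem.Dict Int (List String) × PySem.Dict Int (List String)) i j =>
        (st.1.modify (i - j) [] (· ++ [pvCell board i j]), st.2.modify (i + j) [] (· ++ [pvCell board i j])))]
  have hsplit := PySem.List.foldl_prod_mk
      (f := fun (d : PySem.Dict Int (List String)) (p : Int × Int) => d.modify (p.1 - p.2) [] (· ++ [pvCell board p.1 p.2]))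
      (g := fun (d : PySem.Dict Int (List String)) (p : Int × Int) => d.modify (p.1 + p.2) [] (· ++ [pvCell board p.1 p.2]))
      (l := (PySem.List.pyRange 0 size 1).flatMap (fun i => (PySem.List.pyRange 0 size 1).map (fun j => (i, j))))
      (a := PySem.Dict.empty) (b := PySem.Dict.empty)
  beta_reduce at hsplit
  rw [hsplit]
  rw [show ((PySem.List.pyRange 0 size 1).flatMap (fun i => (PySem.List.pyRange 0 size 1).map (fun j => (i, j)))) = pvPairs size from rfl]
  rw [(pv_group_eq board size).1, (pv_group_eq board size).2]
  rw [PySem.List.foldl_add (g := fun l => score_line (PySem.Str.join "" l) player opponent),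
      PySem.List.foldl_add (g := fun l => score_line (PySem.Str.join "" l) player opponent)]
  ring

lemma pv_flatMap_ite_singleton {α β : Type} (l : List α) (p : α → Prop) [DecidablePred p] (f : α → β) :
    l.flatMap (fun x => if p x then [f x] else []) = (l.filter (fun x => decide (p x))).map f := by
  induction l with
  | nil => rfl
  | cons a t ih => by_cases h : p a <;> simp [h, ih]

lemma pv_filter_beq_pyRange (a b v : Int) :
    (PySem.List.pyRange a b 1).filter (fun x => x == v) = if a ≤ v ∧ v < b then [v] else [] := by
  rw [List.filter_beq]
  by_cases h : a ≤ v ∧ v < b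
  · rw [if_pos h, List.count_eq_one_of_mem (PySem.List.nodup_pyRange_one a b) (PySem.List.mem_pyRange_one.2 h)]
    simp
  · rw [if_neg h, List.count_eq_zero_of_not_mem (fun hm => h (PySem.List.mem_pyRange_one.1 hm))]
    rfl

lemma pv_filter_pyRange_extend (lo hi size : Int) (c : Int → Bool) (h0 : 0 ≤ lo) (hlh : lo ≤ hi) (hhs : hi ≤ size)
    (hlow : ∀ i, 0 ≤ i → i < lo → c i = false) (hhigh : ∀ i, hi ≤ i → i < size → c i = false) :
    (PySem.List.pyRange 0 size 1).filter c = (PySem.List.pyRange lo hi 1).filter c := by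
  have e1 : (PySem.List.pyRange 0 lo 1).filter c = [] :=
    List.filter_eq_nil_iff.2 (fun x hx => by
      have h := PySem.List.mem_pyRange_one.1 hx
      simp [hlow x h.1 h.2])
  have e3 : (PySem.List.pyRange hi size 1).filter c = [] :=
    List.filter_eq_nil_iff.2 (fun x hx => by
      have h := PySem.List.mem_pyRange_one.1 hx
      simp [hhigh x h.1 h.2])
  rw [PySem.List.pyRange_one_append 0 lo size h0 (le_trans hlh hhs),
      PySem.List.pyRange_one_append lo hi size hlh hhs,
      List.filter_append, List.filter_append, e1, e3]
  simp

lemma pv_bucket_main (board : List (List String)) (size k : Int) (h1 : 1 - size ≤ k) (h2 : k < size) :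
    ((pvPM board size).filter (fun p => p.1 == k)).map (·.2) = get_diagonal board size k true := by
  unfold pvPM pvPairs get_diagonal
  simp only [if_true, List.filter_map, List.map_map, List.filter_flatMap, List.map_flatMap, Function.comp_def]
  have hpred : ∀ i : Int, (fun j => i - j == k) = (fun j : Int => j == i - k) := by
    intro i; funext j
    rcases eq_or_ne j (i - k) with h | h
    · have h2 : i - j = k := by omega
      simp [h]
    · have h2 : i - j ≠ k := by omega
      simp [h, h2]
  simp only [hpred, pv_filter_beq_pyRange, apply_ite, List.map_cons, List.map_nil]
  rw [pv_flatMap_ite_singleton (p := fun a => 0 ≤ a - k ∧ a - k < size) (f := fun a => pvCell board a (a - k))]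
  rw [PySem.List.foldl_append_ite (p := fun i => 0 ≤ i - k ∧ i - k < size) (f := fun i => pvCell board i (i - k))]
  rw [pv_filter_pyRange_extend (max 0 k) (min size (size + k)) size _
        (le_max_left 0 k) (by omega) (min_le_left _ _)
        (fun i hi1 hi2 => by simp only [decide_eq_false_iff_not]; omega)
        (fun i hi1 hi2 => by simp only [decide_eq_false_iff_not]; omega)]
  simp

lemma pv_bucket_anti (board : List (List String)) (size k : Int) (h1 : 0 ≤ k) (h2 : k ≤ 2 * size - 2) :
    ((pvPA board size).filter (fun p => p.1 == k)).map (·.2) = get_diagonal board size (k - size + 1) false := by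
  unfold pvPA pvPairs get_diagonal
  simp only [if_false, Bool.false_eq_true, List.filter_map, List.map_map, List.filter_flatMap,
    List.map_flatMap, Function.comp_def]
  have hpred : ∀ i : Int, (fun j => i + j == k) = (fun j : Int => j == k - i) := by
    intro i; funext j
    rcases eq_or_ne j (k - i) with h | h
    · have h2 : i + j = k := by omega
      simp [h]
    · have h2 : i + j ≠ k := by omega
      simp [h, h2]
  simp only [hpred, pv_filter_beq_pyRange, apply_ite, List.map_cons, List.map_nil]
  rw [pv_flatMap_ite_singleton (p := fun a => 0 ≤ k - a ∧ k - a < size) (f := fun a => pvCell board a (k - a))]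
  rw [PySem.List.foldl_append_ite
        (p := fun i => 0 ≤ size - 1 - (i - (k - size + 1)) ∧ size - 1 - (i - (k - size + 1)) < size)
        (f := fun i => pvCell board i (size - 1 - (i - (k - size + 1))))]
  have hcond : (fun i : Int => decide (0 ≤ k - i ∧ k - i < size))
      = (fun i : Int => decide (0 ≤ size - 1 - (i - (k - size + 1)) ∧ size - 1 - (i - (k - size + 1)) < size)) := by
    funext i; exact decide_eq_decide.2 (by omega)
  have hfun : (fun a : Int => pvCell board a (k - a))
      = (fun i : Int => pvCell board i (size - 1 - (i - (k - size + 1)))) := by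
    funext i; congr 1; ring
  rw [hcond, hfun]
  rw [pv_filter_pyRange_extend (max 0 (k - size + 1)) (min size (size + (k - size + 1))) size _
        (le_max_left _ _) (by omega) (min_le_left _ _)
        (fun i hi1 hi2 => by simp only [decide_eq_false_iff_not]; omega)
        (fun i hi1 hi2 => by simp only [decide_eq_false_iff_not]; omega)]
  simp

lemma pv_mem_keysM (board : List (List String)) (size y : Int) :
    y ∈ (pvPM board size).map (·.1) ↔ (1 - size ≤ y ∧ y < size) := by
  unfold pvPM pvPairs
  simp only [List.map_map, List.mem_map, List.mem_flatMap, PySem.List.mem_pyRange_one,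
    Function.comp_def]
  constructor
  · rintro ⟨p, ⟨a, ha, x, hx, rfl⟩, h⟩
    simp only [] at h
    omega
  · rintro ⟨hy1, hy2⟩
    by_cases hy : 0 ≤ y
    · exact ⟨(y, 0), ⟨y, by omega, 0, by omega, rfl⟩, by simp⟩
    · exact ⟨(0, -y), ⟨0, by omega, -y, by omega, rfl⟩, by simp⟩

lemma pv_mem_keysA (board : List (List String)) (size y : Int) :
    y ∈ (pvPA board size).map (·.1) ↔ (0 ≤ y ∧ y ≤ 2 * size - 2) := by
  unfold pvPA pvPairs
  simp only [List.map_map, List.mem_map, List.mem_flatMap, PySem.List.mem_pyRange_one,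
    Function.comp_def]
  constructor
  · rintro ⟨p, ⟨a, ha, x, hx, rfl⟩, h⟩
    simp only [] at h
    omega
  · rintro ⟨hy1, hy2⟩
    by_cases hy : y < size
    · exact ⟨(y, 0), ⟨y, by omega, 0, by omega, rfl⟩, by simp⟩
    · exact ⟨(size - 1, y - size + 1), ⟨size - 1, by omega, y - size + 1, by omega, rfl⟩, by simp⟩

-- ===== VERDICT (by name: the statement is the Claim_ definition above) =====
theorem evaluate_all_diagonals_spec : Claim_equal_evaluate_all_diagonals := by
  intro board size player opponent _ _
  unfold Spec_evaluate_all_diagonals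
  -- A as a pair of sums over all offsets
  have hA : evaluate_all_diagonals board size player opponent
      = ((PySem.List.pyRange (-size + 1) size 1).map
          (fun d => evaluate_line (get_diagonal board size d true) player opponent)).sum
      + ((PySem.List.pyRange (-size + 1) size 1).map
          (fun d => evaluate_line (get_diagonal board size d false) player opponent)).sum := by
    unfold evaluate_all_diagonals
    simp only [add_assoc]
    rw [PySem.List.foldl_add (g := fun d =>
      evaluate_line (get_diagonal board size d true) player opponent
      + evaluate_line (get_diagonal board size d false) player opponent)]
    rw [PySem.List.sum_map_add_int]
    simp
  -- main-diagonal dict of B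
  have hndM : (pvGroup (pvPM board size)).keys.Nodup := by
    unfold pvGroup
    exact PySem.Dict.nodup_keys_foldl_modify_key (pvPM board size) Prod.fst []
      (fun _ q => (· ++ [q.2])) PySem.Dict.empty (by simp)
  have hkM : (pvGroup (pvPM board size)).keys = PySem.Set.ofList ((pvPM board size).map (·.1)) := by
    unfold pvGroup
    rw [PySem.Dict.keys_foldl_modify_key (pvPM board size) Prod.fst []
      (fun _ q => (· ++ [q.2])) PySem.Dict.empty]
    simp [PySem.Set.update_nil_left]
  have hgM : ∀ kk ∈ (pvGroup (pvPM board size)).keys,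
      (pvGroup (pvPM board size)).getD kk [] = get_diagonal board size kk true := by
    intro kk hkk
    rw [hkM] at hkk
    have hb := (pv_mem_keysM board size kk).1 (by simpa [PySem.Set.mem_ofList] using hkk)
    unfold pvGroup
    rw [PySem.Dict.getD_foldl_modify_append]
    simpa using pv_bucket_main board size kk hb.1 hb.2
  have hpermM : (pvGroup (pvPM board size)).keys.Perm (PySem.List.pyRange (-size + 1) size 1) := by
    refine (List.perm_ext_iff_of_nodup hndM (PySem.List.nodup_pyRange_one _ _)).2 (fun a => ?_)
    rw [hkM]
    simp only [PySem.Set.mem_ofList, pv_mem_keysM, PySem.List.mem_pyRange_one]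
    omega
  have hvM : ((pvGroup (pvPM board size)).values.map (fun l => score_line (PySem.Str.join "" l) player opponent)).sum
      = ((PySem.List.pyRange (-size + 1) size 1).map
          (fun d => evaluate_line (get_diagonal board size d true) player opponent)).sum := by
    rw [PySem.Dict.values_eq_map_keys _ hndM [], List.map_map]
    rw [List.map_congr_left (l := (pvGroup (pvPM board size)).keys)
      (f := (fun l => score_line (PySem.Str.join "" l) player opponent) ∘ (fun kk => (pvGroup (pvPM board size)).getD kk []))
      (g := fun kk => evaluate_line (get_diagonal board size kk true) player opponent)
      (fun kk hkk => by
        simp only [Function.comp_def]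
        rw [hgM kk hkk, ← pv_line_eq])]
    exact (hpermM.map _).sum_eq
  -- anti-diagonal dict of B
  have hndA : (pvGroup (pvPA board size)).keys.Nodup := by
    unfold pvGroup
    exact PySem.Dict.nodup_keys_foldl_modify_key (pvPA board size) Prod.fst []
      (fun _ q => (· ++ [q.2])) PySem.Dict.empty (by simp)
  have hkA : (pvGroup (pvPA board size)).keys = PySem.Set.ofList ((pvPA board size).map (·.1)) := by
    unfold pvGroup
    rw [PySem.Dict.keys_foldl_modify_key (pvPA board size) Prod.fst []
      (fun _ q => (· ++ [q.2])) PySem.Dict.empty]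
    simp [PySem.Set.update_nil_left]
  have hgA : ∀ kk ∈ (pvGroup (pvPA board size)).keys,
      (pvGroup (pvPA board size)).getD kk [] = get_diagonal board size (kk - size + 1) false := by
    intro kk hkk
    rw [hkA] at hkk
    have hb := (pv_mem_keysA board size kk).1 (by simpa [PySem.Set.mem_ofList] using hkk)
    unfold pvGroup
    rw [PySem.Dict.getD_foldl_modify_append]
    simpa using pv_bucket_anti board size kk hb.1 hb.2
  have hpermA : (pvGroup (pvPA board size)).keys.Perm (PySem.List.pyRange 0 (2 * size - 1) 1) := by
    refine (List.perm_ext_iff_of_nodup hndA (PySem.List.nodup_pyRange_one _ _)).2 (fun a => ?_)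
    rw [hkA]
    simp only [PySem.Set.mem_ofList, pv_mem_keysA, PySem.List.mem_pyRange_one]
    omega
  have hvA : ((pvGroup (pvPA board size)).values.map (fun l => score_line (PySem.Str.join "" l) player opponent)).sum
      = ((PySem.List.pyRange 0 (2 * size - 1) 1).map
          (fun kk => evaluate_line (get_diagonal board size (kk - size + 1) false) player opponent)).sum := by
    rw [PySem.Dict.values_eq_map_keys _ hndA [], List.map_map]
    rw [List.map_congr_left (l := (pvGroup (pvPA board size)).keys)
      (f := (fun l => score_line (PySem.Str.join "" l) player opponent) ∘ (fun kk => (pvGroup (pvPA board size)).getD kk []))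
      (g := fun kk => evaluate_line (get_diagonal board size (kk - size + 1) false) player opponent)
      (fun kk hkk => by
        simp only [Function.comp_def]
        rw [hgA kk hkk, ← pv_line_eq])]
    exact (hpermA.map _).sum_eq
  -- reindex the anti sum from keys 0..2*size-2 to offsets -size+1..size-1
  have hre : ((PySem.List.pyRange 0 (2 * size - 1) 1).map
        (fun kk => evaluate_line (get_diagonal board size (kk - size + 1) false) player opponent)).sum
      = ((PySem.List.pyRange (-size + 1) size 1).map
        (fun d => evaluate_line (get_diagonal board size d false) player opponent)).sum := by
    rw [PySem.List.pyRange_one 0 (2 * size - 1), PySem.List.pyRange_one (-size + 1) size]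
    have h : (2 * size - 1 - 0) = (size - (-size + 1)) := by ring
    rw [h, List.map_map, List.map_map]
    refine congrArg List.sum (List.map_congr_left (fun m _ => ?_))
    simp only [Function.comp_def]
    congr 2
    omega
  rw [pv_alt_eq, hA, hvM, hvA, hre]
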